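-- pv_equiv track=rewrite | github.com/SvizzerChow/MyLeetCode | face/16.11.diving-board-lcci.py | divingBoard
-- ===== SOURCE A (Python) =====
-- from typing import List
--
-- def divingBoard(shorter: int, longer: int, k: int) -> List[int]:
--     if k == 0:
--         return []
--     if shorter == longer:
--         return [shorter * k]
--     result = [shorter * k] * (k + 1)
--     i = 1
--     temp = longer - shorter
--     while i <= k:
--         result[i] = result[i - 1] + temp
--         i += 1
--     return result
-- ===== SOURCE B (Python) =====
-- from typing import List
--
-- def divingBoard(shorter: int, longer: int, k: int) -> List[int]:
--     if k == 0:
--         return []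
--     if shorter == longer:
--         return [shorter * k]
--     return [shorter * k + i * (longer - shorter) for i in range(k + 1)]
-- ===== Notes on version B (the rewrite author's own statement) =====
-- stated objective: simpler
-- what changed: Replaced the preallocated list and the accumulating while-loop (each element computed from the previous one) by a closed-form comprehension computing each element independently as shorter*k + i*(longer-shorter).
import Mathlib
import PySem

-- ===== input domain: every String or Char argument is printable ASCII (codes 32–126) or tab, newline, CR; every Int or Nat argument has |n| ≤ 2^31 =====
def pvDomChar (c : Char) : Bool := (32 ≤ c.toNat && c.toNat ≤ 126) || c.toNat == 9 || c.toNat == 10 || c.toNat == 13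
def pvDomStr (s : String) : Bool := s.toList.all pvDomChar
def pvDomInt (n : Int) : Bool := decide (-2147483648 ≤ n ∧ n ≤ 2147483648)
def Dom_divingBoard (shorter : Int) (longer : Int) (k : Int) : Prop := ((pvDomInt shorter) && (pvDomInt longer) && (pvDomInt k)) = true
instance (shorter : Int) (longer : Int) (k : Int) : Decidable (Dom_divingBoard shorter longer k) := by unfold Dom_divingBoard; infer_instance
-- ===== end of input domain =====

-- B replaces A's accumulating while-loop by a closed-form comprehension (same cost, simpler decomposition).

-- ===== PORT A =====
-- A's while-loop: n remaining iterations, current index i; in A's call i ranges over 1..k,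
-- always in range, so plain Nat indexing/getD is exact for Python's result[i] here.
def divingBoardLoop (temp : Int) : Nat → Nat → List Int → List Int
  | 0, _, res => res
  | n + 1, i, res => divingBoardLoop temp n (i + 1) (res.set i (res.getD (i - 1) 0 + temp))

def divingBoard (shorter : Int) (longer : Int) (k : Int) : List Int :=
  if k = 0 then []
  else if shorter = longer then [shorter * k]
  else
    let result := List.replicate (k + 1).toNat (shorter * k)
    let temp := longer - shorter
    divingBoardLoop temp k.toNat 1 result

-- ===== PORT B =====
def divingBoard_alt (shorter : Int) (longer : Int) (k : Int) : List Int :=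
  if k = 0 then []
  else if shorter = longer then [shorter * k]
  else (PySem.List.pyRange 0 (k + 1) 1).map (fun i => shorter * k + i * (longer - shorter))

-- ===== PRECONDITION & SPEC =====
def Spec_divingBoard (shorter : Int) (longer : Int) (k : Int) (out : List Int) : Prop := out = divingBoard_alt shorter longer k
instance (shorter : Int) (longer : Int) (k : Int) (out : List Int) : Decidable (Spec_divingBoard shorter longer k out) := by unfold Spec_divingBoard; infer_instance

-- ===== CLAIM (what is proved, stated in full; the proofs are below) =====
def Claim_equal_divingBoard : Prop := ∀ (shorter : Int) (longer : Int) (k : Int), Dom_divingBoard shorter longer k → Spec_divingBoard shorter longer k (divingBoard shorter longer k)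

-- ===== LEMMAS AND PROOFS =====

-- After n iterations starting at index i (1 ≤ i, i + n ≤ length), the loop fills indices
-- i, …, i+n-1 with res[i-1] + (t+1)*temp and leaves the rest of the list unchanged.
theorem divingBoardLoop_eq (temp : Int) (n : Nat) : ∀ (i : Nat) (res : List Int),
    1 ≤ i → i + n ≤ res.length →
    divingBoardLoop temp n i res =
      res.take i ++ (List.range n).map (fun t : Nat => res.getD (i - 1) 0 + ((t : Int) + 1) * temp)
        ++ res.drop (i + n) := by
  induction n with
  | zero =>
    intro i res _ _
    simp [divingBoardLoop]
  | succ n ih =>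
    intro i res hi hlen
    have hlt : i < res.length := by omega
    rw [divingBoardLoop, ih (i + 1) _ (by omega) (by simpa using by omega)]
    simp only [Nat.add_sub_cancel]
    have hgetD : (res.set i (res.getD (i - 1) 0 + temp)).getD i 0 = res.getD (i - 1) 0 + temp := by
      simp [List.getD, List.getElem?_set_self hlt]
    rw [hgetD]
    have htake : (res.set i (res.getD (i - 1) 0 + temp)).take (i + 1)
        = res.take i ++ [res.getD (i - 1) 0 + temp] := by
      apply List.ext_getElem
      · simp; omega
      · intro j h1 h2
        simp only [List.length_take, List.length_set] at h1
        rw [List.getElem_take]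
        by_cases hj : j = i
        · subst hj
          rw [List.getElem_set_self]
          rw [List.getElem_append_right (by simp)]
          simp [List.getD, List.getElem?_eq_getElem (show j - 1 < res.length by omega)]
        · rw [List.getElem_set_ne (fun h => hj h.symm)]
          rw [List.getElem_append_left (by simp; omega)]
          rw [List.getElem_take]
    have hdrop : (res.set i (res.getD (i - 1) 0 + temp)).drop (i + 1 + n)
        = res.drop (i + (n + 1)) := by
      rw [List.drop_set, if_pos (by omega)]
      congr 1
      omega
    rw [htake, hdrop]
    have hrange : (List.range (n + 1)).map (fun t : Nat => res.getD (i - 1) 0 + ((t : Int) + 1) * temp)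
        = (res.getD (i - 1) 0 + temp)
          :: (List.range n).map (fun t : Nat => res.getD (i - 1) 0 + temp + ((t : Int) + 1) * temp) := by
      rw [List.range_succ_eq_map, List.map_cons, List.map_map]
      congr 1
      · ring
      · apply List.map_congr_left
        intro t _
        simp [Function.comp]
        ring
    rw [hrange]
    simp [List.append_assoc]

theorem divingBoard_eq_formula (shorter longer k : Int) (hk0 : k ≠ 0) (hne : shorter ≠ longer)
    (hkpos : 0 < k) :
    divingBoard shorter longer k
      = (List.range (k + 1).toNat).map (fun t : Nat => shorter * k + (t : Int) * (longer - shorter)) := by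
  unfold divingBoard
  rw [if_neg hk0, if_neg hne]
  have htoNat : (k + 1).toNat = k.toNat + 1 := by omega
  have hlen : (List.replicate (k + 1).toNat (shorter * k)).length = (k + 1).toNat := by simp
  have h1 : 1 + k.toNat ≤ (List.replicate (k + 1).toNat (shorter * k)).length := by
    rw [hlen]; omega
  rw [divingBoardLoop_eq _ _ 1 _ (le_refl 1) h1]
  have hgd : (List.replicate (k + 1).toNat (shorter * k)).getD 0 0 = shorter * k := by
    simp [List.getD, htoNat]
  have htake : (List.replicate (k + 1).toNat (shorter * k)).take 1 = [shorter * k] := by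
    rw [htoNat]; simp [List.replicate_succ]
  have hdrop : (List.replicate (k + 1).toNat (shorter * k)).drop (1 + k.toNat) = [] := by
    apply List.drop_eq_nil_of_le; rw [hlen]; omega
  rw [hgd, htake, hdrop, htoNat, List.range_succ_eq_map, List.map_cons, List.map_map]
  simp only [List.append_nil]
  rw [List.singleton_append]
  congr 1
  push_cast; ring

-- ===== VERDICT (by name: the statement is the Claim_ definition above) =====
theorem divingBoard_spec : Claim_equal_divingBoard := by
  intro shorter longer k _
  unfold Spec_divingBoard divingBoard_alt
  by_cases hk0 : k = 0
  · simp [divingBoard, hk0]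
  by_cases hne : shorter = longer
  · simp [divingBoard, hk0, hne]
  rw [if_neg hk0, if_neg hne]
  by_cases hkpos : 0 < k
  · rw [divingBoard_eq_formula shorter longer k hk0 hne hkpos, PySem.List.pyRange_one]
    simp only [Int.sub_zero, List.map_map]
    apply List.map_congr_left
    intro t _
    simp [Function.comp]
  · -- k < 0: both sides are empty
    have h1 : (k + 1).toNat = 0 := by omega
    have h2 : k.toNat = 0 := by omega
    unfold divingBoard
    rw [if_neg hk0, if_neg hne]
    simp [h1, h2, divingBoardLoop, PySem.List.pyRange_one]
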